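-- pv_equiv track=rewrite | github.com/Kevinbastin/bill_excel | backend/ocr/excel_writer.py | _trim_empty_cols
-- ===== SOURCE A (Python) =====
-- from typing import Dict, List, Any, Optional
--
-- def _trim_empty_cols(grid: List[List[str]]) -> List[List[str]]:
--     if not grid:
--         return grid
--     max_cols = max((len(r) for r in grid), default=0)
--     last_used = -1
--     for c in range(max_cols):
--         if any((c < len(r) and (r[c] or "").strip()) for r in grid):
--             last_used = c
--     if last_used < 0:
--         return grid
--     return [r[: last_used + 1] for r in grid]
-- ===== SOURCE B (Python) =====
-- from typing import List
--
-- def _row_last_used(row: List[str]) -> int: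
--     """Index of the rightmost non-empty cell of the row, or -1."""
--     for i in range(len(row) - 1, -1, -1):
--         if (row[i] or "").strip():
--             return i
--     return -1
--
-- def _trim_empty_cols(grid: List[List[str]]) -> List[List[str]]:
--     if not grid:
--         return grid
--     last_used = -1
--     for r in grid:
--         idx = _row_last_used(r)
--         if idx > last_used:
--             last_used = idx
--     if last_used < 0:
--         return grid
--     return [r[: last_used + 1] for r in grid]
-- ===== Notes on version B (the rewrite author's own statement) =====
-- stated objective: alternative
-- what changed: Instead of scanning every column index across all rows (column-major double loop over range(max_cols) x grid), B computes each row's rightmost non-empty index by a single right-to-left scan with early break and takes the maximum over rows; the max_cols pass and the per-column any() scans disappear.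
import Mathlib
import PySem

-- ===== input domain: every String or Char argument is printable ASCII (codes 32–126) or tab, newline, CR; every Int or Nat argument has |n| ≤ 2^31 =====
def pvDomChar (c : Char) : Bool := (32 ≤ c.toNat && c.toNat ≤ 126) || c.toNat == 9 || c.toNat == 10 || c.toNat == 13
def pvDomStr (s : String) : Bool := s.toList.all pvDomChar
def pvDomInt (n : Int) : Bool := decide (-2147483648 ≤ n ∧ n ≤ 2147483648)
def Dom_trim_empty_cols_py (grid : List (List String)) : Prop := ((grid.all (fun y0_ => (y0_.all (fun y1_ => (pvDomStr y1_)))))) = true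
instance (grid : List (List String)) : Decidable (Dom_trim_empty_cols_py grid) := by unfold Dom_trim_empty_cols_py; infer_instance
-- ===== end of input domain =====

-- B replaces A's column-major scan (for each c in range(max_cols), any over all rows)
-- by one right-to-left scan per row for its rightmost non-empty cell, then takes the max.

-- shared emptiness test: Python's `(v or "").strip()` used as a boolean (both sources use it verbatim)
def pvCellUsed (v : String) : Bool := decide (PySem.Str.strip (if v = "" then "" else v) ≠ "")

-- ===== PORT A =====
def trim_empty_cols_py (grid : List (List String)) : List (List String) :=
  if grid = [] then grid
  else
    let max_cols : Int := grid.foldl (fun m r => max m ((r.length : Int))) 0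
    let last_used : Int :=
      (PySem.List.pyRange 0 max_cols).foldl
        (fun lu c =>
          if grid.any (fun r => decide (c < (r.length : Int)) && pvCellUsed (PySem.List.pyGetD r c ""))
          then c else lu) (-1)
    if last_used < 0 then grid
    else grid.map (fun r => PySem.List.slice r none (some (last_used + 1)))

-- ===== PORT B =====
-- the `for i in range(len(row)-1,-1,-1): … return i` loop of _row_last_used, as a
-- right-to-left walk (structural recursion on the reversed row, carrying the index)
def pvRowLastAux : List String → Int → Int
  | [], _ => -1
  | v :: rest, i => if pvCellUsed v then i else pvRowLastAux rest (i - 1)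

def pvRowLastUsed (row : List String) : Int :=
  pvRowLastAux row.reverse ((row.length : Int) - 1)

def trim_empty_cols_py_alt (grid : List (List String)) : List (List String) :=
  if grid = [] then grid
  else
    let last_used : Int :=
      grid.foldl (fun lu r => let idx := pvRowLastUsed r; if idx > lu then idx else lu) (-1)
    if last_used < 0 then grid
    else grid.map (fun r => PySem.List.slice r none (some (last_used + 1)))

-- ===== PRECONDITION & SPEC =====
def Spec_trim_empty_cols_py (grid : List (List String)) (out : List (List String)) : Prop := out = trim_empty_cols_py_alt grid
instance (grid : List (List String)) (out : List (List String)) : Decidable (Spec_trim_empty_cols_py grid out) := by unfold Spec_trim_empty_cols_py; infer_instance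

-- ===== CLAIM (what is proved, stated in full; the proofs are below) =====
def Claim_equal_trim_empty_cols_py : Prop := ∀ (grid : List (List String)), Dom_trim_empty_cols_py grid → Spec_trim_empty_cols_py grid (trim_empty_cols_py grid)

-- ===== LEMMAS AND PROOFS =====

-- "column c is used": some row has a non-empty cell at (Nat) index c
def pvColUsed (grid : List (List String)) (c : Int) : Prop :=
  ∃ r ∈ grid, ∃ i : Nat, (i : Int) = c ∧ i < r.length ∧ pvCellUsed (r.getD i "") = true

-- A's step function and fold (Nat-range form)
def pvAStep (grid : List (List String)) (lu c : Int) : Int :=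
  if grid.any (fun r => decide (c < (r.length : Int)) && pvCellUsed (PySem.List.pyGetD r c "")) then c else lu

def pvAFoldN (grid : List (List String)) (m : Nat) : Int :=
  (List.range m).foldl (fun lu k => pvAStep grid lu (k : Int)) (-1)

-- the boolean A tests at column c agrees with pvColUsed for 0 ≤ c
lemma pvATest_iff (grid : List (List String)) (k : Nat) :
    (grid.any (fun r => decide ((k : Int) < (r.length : Int)) && pvCellUsed (PySem.List.pyGetD r (k : Int) ""))) = true
      ↔ pvColUsed grid (k : Int) := by
  simp only [List.any_eq_true, Bool.and_eq_true, decide_eq_true_eq, pvColUsed]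
  constructor
  · rintro ⟨r, hr, hlt, hused⟩
    refine ⟨r, hr, k, rfl, by exact_mod_cast hlt, ?_⟩
    rwa [PySem.List.pyGetD_natCast] at hused
  · rintro ⟨r, hr, i, hik, hlen, hused⟩
    have : i = k := by exact_mod_cast hik
    subst this
    exact ⟨r, hr, by exact_mod_cast hlen, by rwa [PySem.List.pyGetD_natCast]⟩

lemma pvAFoldN_achieves (grid : List (List String)) (m : Nat) :
    pvAFoldN grid m = -1 ∨ pvColUsed grid (pvAFoldN grid m) := by
  induction m with
  | zero => left; rfl
  | succ m ih =>
    have h : pvAFoldN grid (m+1) = pvAStep grid (pvAFoldN grid m) (m : Int) := by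
      simp [pvAFoldN, List.range_succ]
    rw [h]
    unfold pvAStep
    by_cases hc : (grid.any (fun r => decide ((m:Int) < (r.length : Int)) && pvCellUsed (PySem.List.pyGetD r (m:Int) ""))) = true
    · right; simp only [hc, if_true]; exact (pvATest_iff grid m).1 hc
    · simp only [hc]; exact ih

-- forward reference: bound pvAFoldN grid m ≤ m - 1 < m
lemma pvAFoldN_le (grid : List (List String)) (m : Nat) : pvAFoldN grid m ≤ (m : Int) := by
  induction m with
  | zero => simp [pvAFoldN]
  | succ m ih =>
    have h : pvAFoldN grid (m+1) = pvAStep grid (pvAFoldN grid m) (m : Int) := by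
      simp [pvAFoldN, List.range_succ]
    rw [h]; unfold pvAStep
    split_ifs with hc
    · push_cast; omega
    · push_cast; omega

lemma pvAFoldN_ub (grid : List (List String)) (m k : Nat) (hk : k < m)
    (hu : pvColUsed grid (k : Int)) : (k : Int) ≤ pvAFoldN grid m := by
  induction m with
  | zero => omega
  | succ m ih =>
    have h : pvAFoldN grid (m+1) = pvAStep grid (pvAFoldN grid m) (m : Int) := by
      simp [pvAFoldN, List.range_succ]
    rw [h]; unfold pvAStep
    by_cases hkm : k = m
    · subst hkm
      rw [if_pos ((pvATest_iff grid k).2 hu)]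
    · have hkm' : k < m := by omega
      have := ih hkm'
      split_ifs with hc
      · exact le_trans this (by
          have := (pvAFoldN_achieves grid m)
          -- pvAFoldN grid m ≤ m in all cases
          exact pvAFoldN_le grid m)
      · exact this

-- B side: pvRowLastAux characterisation
lemma pvRowLastAux_achieves (l : List String) (i0 : Int) :
    pvRowLastAux l i0 = -1 ∨
      ∃ j : Nat, j < l.length ∧ pvRowLastAux l i0 = i0 - j ∧ pvCellUsed (l.getD j "") = true := by
  induction l generalizing i0 with
  | nil => left; rfl
  | cons v rest ih =>
    by_cases hv : pvCellUsed v = true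
    · right; exact ⟨0, by simp, by simp [pvRowLastAux, hv], by simpa using hv⟩
    · have : pvRowLastAux (v :: rest) i0 = pvRowLastAux rest (i0 - 1) := by
        simp [pvRowLastAux, hv]
      rw [this]
      rcases ih (i0 - 1) with h | ⟨j, hj, hval, hused⟩
      · left; exact h
      · right; exact ⟨j + 1, by simpa using Nat.succ_lt_succ hj,
          by rw [hval]; push_cast [Nat.cast_add]; ring, by simpa using hused⟩

lemma pvRowLastAux_ub (l : List String) (i0 : Int) (j : Nat) (hj : j < l.length)
    (hu : pvCellUsed (l.getD j "") = true) : i0 - j ≤ pvRowLastAux l i0 := by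
  induction l generalizing i0 j with
  | nil => simp at hj
  | cons v rest ih =>
    by_cases hv : pvCellUsed v = true
    · have : pvRowLastAux (v :: rest) i0 = i0 := by simp [pvRowLastAux, hv]
      rw [this]; omega
    · have hstep : pvRowLastAux (v :: rest) i0 = pvRowLastAux rest (i0 - 1) := by
        simp [pvRowLastAux, hv]
      rw [hstep]
      cases j with
      | zero => simp at hu; exact absurd hu hv
      | succ j' =>
        have := ih (i0 - 1) j' (by simpa using Nat.lt_of_succ_lt_succ hj) (by simpa using hu)
        push_cast at this ⊢; omega

-- row-level: pvRowLastUsed r is -1 or a used index of r, and bounds all used indices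
lemma pvRowLast_achieves (r : List String) :
    pvRowLastUsed r = -1 ∨
      ∃ i : Nat, (i : Int) = pvRowLastUsed r ∧ i < r.length ∧ pvCellUsed (r.getD i "") = true := by
  unfold pvRowLastUsed
  rcases pvRowLastAux_achieves r.reverse ((r.length : Int) - 1) with h | ⟨j, hj, hval, hused⟩
  · left; exact h
  · right
    rw [List.length_reverse] at hj
    refine ⟨r.length - 1 - j, ?_, by omega, ?_⟩
    · rw [hval]; omega
    · have : r.reverse.getD j "" = r.getD (r.length - 1 - j) "" := by
        rw [List.getD_eq_getElem?_getD, List.getD_eq_getElem?_getD,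
            List.getElem?_reverse hj]
      rwa [this] at hused

lemma pvRowLast_ub (r : List String) (i : Nat) (hi : i < r.length)
    (hu : pvCellUsed (r.getD i "") = true) : (i : Int) ≤ pvRowLastUsed r := by
  unfold pvRowLastUsed
  have hj : r.length - 1 - i < r.reverse.length := by
    rw [List.length_reverse]; omega
  have hrev : r.reverse.getD (r.length - 1 - i) "" = r.getD i "" := by
    rw [List.getD_eq_getElem?_getD, List.getD_eq_getElem?_getD,
        List.getElem?_reverse (by rw [List.length_reverse] at hj; exact hj)]
    have heq : r.length - 1 - (r.length - 1 - i) = i := by omega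
    rw [heq]
  have := pvRowLastAux_ub r.reverse ((r.length : Int) - 1) (r.length - 1 - i) hj
    (by rw [hrev]; exact hu)
  have hcast : ((r.length : Int) - 1) - ((r.length - 1 - i : Nat) : Int) = (i : Int) := by
    omega
  rwa [hcast] at this

-- B's grid fold
def pvBFold (grid : List (List String)) : Int :=
  grid.foldl (fun lu r => let idx := pvRowLastUsed r; if idx > lu then idx else lu) (-1)

lemma pvBFold_gen_achieves (gs : List (List String)) (acc : Int) :
    gs.foldl (fun lu r => let idx := pvRowLastUsed r; if idx > lu then idx else lu) acc = acc ∨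
      ∃ r ∈ gs, gs.foldl (fun lu r => let idx := pvRowLastUsed r; if idx > lu then idx else lu) acc = pvRowLastUsed r := by
  induction gs generalizing acc with
  | nil => left; rfl
  | cons g rest ih =>
    simp only [List.foldl_cons]
    rcases ih (if pvRowLastUsed g > acc then pvRowLastUsed g else acc) with h | ⟨r, hr, hval⟩
    · rw [h]
      split_ifs with hg
      · right; exact ⟨g, List.mem_cons_self, rfl⟩
      · left; rfl
    · right; exact ⟨r, List.mem_cons_of_mem _ hr, hval⟩

lemma pvBFold_gen_ub (gs : List (List String)) (acc : Int) :
    acc ≤ gs.foldl (fun lu r => let idx := pvRowLastUsed r; if idx > lu then idx else lu) acc ∧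
    ∀ r ∈ gs, pvRowLastUsed r ≤ gs.foldl (fun lu r => let idx := pvRowLastUsed r; if idx > lu then idx else lu) acc := by
  induction gs generalizing acc with
  | nil => exact ⟨le_refl _, by simp⟩
  | cons g rest ih =>
    simp only [List.foldl_cons]
    obtain ⟨h1, h2⟩ := ih (if pvRowLastUsed g > acc then pvRowLastUsed g else acc)
    constructor
    · refine le_trans ?_ h1; split_ifs with hg <;> omega
    · intro r hr
      rcases List.mem_cons.1 hr with rfl | hr'
      · refine le_trans ?_ h1; split_ifs with hg <;> omega
      · exact h2 r hr'

-- max_cols bounds every row length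
lemma pvMaxCols_ge (grid : List (List String)) (r : List String) (hr : r ∈ grid) :
    (r.length : Int) ≤ grid.foldl (fun m r => max m ((r.length : Int))) 0 := by
  have h : grid.foldl (fun m r => max m ((r.length : Int))) 0
      = (grid.map (fun r => (r.length : Int))).foldl max 0 := by
    rw [List.foldl_map]
  rw [h]
  exact (PySem.List.le_foldl_max _ 0).2 _ (List.mem_map_of_mem hr)

lemma pvMaxCols_nonneg (grid : List (List String)) :
    0 ≤ grid.foldl (fun m r => max m ((r.length : Int))) 0 := by
  have h : grid.foldl (fun m r => max m ((r.length : Int))) 0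
      = (grid.map (fun r => (r.length : Int))).foldl max 0 := by
    rw [List.foldl_map]
  rw [h]
  exact (PySem.List.le_foldl_max _ 0).1

-- the two last_used computations agree
lemma pvLastUsed_eq (grid : List (List String)) :
    (PySem.List.pyRange 0 (grid.foldl (fun m r => max m ((r.length : Int))) 0)).foldl
      (fun lu c =>
        if grid.any (fun r => decide (c < (r.length : Int)) && pvCellUsed (PySem.List.pyGetD r c ""))
        then c else lu) (-1)
      = pvBFold grid := by
  set M : Int := grid.foldl (fun m r => max m ((r.length : Int))) 0 with hM
  have hA : ∀ m : Nat, (PySem.List.pyRange 0 (m : Int)).foldl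
      (fun lu c =>
        if grid.any (fun r => decide (c < (r.length : Int)) && pvCellUsed (PySem.List.pyGetD r c ""))
        then c else lu) (-1) = pvAFoldN grid m := by
    intro m
    induction m with
    | zero => simp [PySem.List.pyRange_one_eq_nil, pvAFoldN]
    | succ m ih =>
      have hr : PySem.List.pyRange 0 ((m : Int) + 1) = PySem.List.pyRange 0 (m : Int) ++ [(m : Int)] :=
        PySem.List.pyRange_one_succ_right (by exact_mod_cast Nat.zero_le m)
      have hA' : pvAFoldN grid (m + 1) = pvAStep grid (pvAFoldN grid m) (m : Int) := by
        simp [pvAFoldN, List.range_succ]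
      push_cast
      rw [hr, List.foldl_append, ih, hA']
      rfl
  have hM0 : ((M.toNat : Int)) = M := Int.toNat_of_nonneg (by rw [hM]; exact pvMaxCols_nonneg grid)
  rw [← hM0, hA M.toNat]
  -- both sides are the maximum of the used columns (or -1)
  have hAach := pvAFoldN_achieves grid M.toNat
  have hBach := pvBFold_gen_achieves grid (-1)
  have hBub := pvBFold_gen_ub grid (-1)
  -- A ≤ B
  have hAB : pvAFoldN grid M.toNat ≤ pvBFold grid := by
    rcases hAach with h | hu
    · rw [h]; exact hBub.1
    · obtain ⟨r, hr, i, hik, hlen, hused⟩ := hu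
      rw [← hik]
      exact le_trans (pvRowLast_ub r i hlen hused) (hBub.2 r hr)
  -- B ≤ A
  have hBA : pvBFold grid ≤ pvAFoldN grid M.toNat := by
    rcases hBach with h | ⟨r, hr, hval⟩
    · rw [pvBFold, h]
      rcases hAach with h' | hu
      · rw [h']
      · obtain ⟨r, hr, i, hik, _, _⟩ := hu
        have : (0:Int) ≤ pvAFoldN grid M.toNat := by rw [← hik]; exact_mod_cast Int.natCast_nonneg i
        omega
    · rw [pvBFold, hval]
      rcases pvRowLast_achieves r with h' | ⟨i, hival, hlen, hused⟩
      · rw [h']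
        rcases hAach with h'' | hu
        · rw [h'']
        · obtain ⟨r', hr', i', hik', _, _⟩ := hu
          have : (0:Int) ≤ pvAFoldN grid M.toNat := by rw [← hik']; exact_mod_cast Int.natCast_nonneg i'
          omega
      · rw [← hival]
        have hiM : i < M.toNat := by
          have h1 : (r.length : Int) ≤ M := pvMaxCols_ge grid r hr
          have h0 : 0 ≤ M := pvMaxCols_nonneg grid
          omega
        exact pvAFoldN_ub grid M.toNat i hiM ⟨r, hr, i, rfl, hlen, hused⟩
  omega

-- ===== VERDICT (by name: the statement is the Claim_ definition above) =====
theorem trim_empty_cols_py_spec : Claim_equal_trim_empty_cols_py := by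
  intro grid _
  unfold Spec_trim_empty_cols_py trim_empty_cols_py trim_empty_cols_py_alt
  by_cases hg : grid = []
  · simp [hg]
  · simp only [hg, if_false]
    rw [pvLastUsed_eq grid]
    rfl
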